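-- pv_equiv track=rewrite | github.com/acesley180604/polymarket | polymarket_capital.py | _city_region
-- ===== SOURCE A (Python) =====
-- def _city_region(city):
--     city = (city or "").lower()
--     region_map = {
--         "east_asia": {
--             "hong kong", "shenzhen", "guangzhou", "taipei", "shanghai",
--             "beijing", "wuhan", "chengdu", "chongqing", "seoul", "busan", "tokyo",
--         },
--         "southeast_asia": {"singapore", "kuala lumpur", "jakarta", "manila"},
--         "europe": {
--             "london", "paris", "madrid", "milan", "amsterdam", "warsaw",
--             "helsinki", "moscow", "istanbul", "ankara", "munich",
--         },
--         "north_america": {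
--             "new york city", "new york", "nyc", "toronto", "seattle", "dallas",
--             "atlanta", "miami", "chicago", "houston", "austin", "denver",
--             "los angeles", "san francisco", "mexico city", "panama city",
--         },
--     }
--     for region, cities in region_map.items():
--         if city in cities:
--             return region
--     return "other"
-- ===== SOURCE B (Python) =====
-- _REGION_BY_CITY = {
--     "hong kong": "east_asia", "shenzhen": "east_asia", "guangzhou": "east_asia",
--     "taipei": "east_asia", "shanghai": "east_asia", "beijing": "east_asia",
--     "wuhan": "east_asia", "chengdu": "east_asia", "chongqing": "east_asia",
--     "seoul": "east_asia", "busan": "east_asia", "tokyo": "east_asia",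
--     "singapore": "southeast_asia", "kuala lumpur": "southeast_asia",
--     "jakarta": "southeast_asia", "manila": "southeast_asia",
--     "london": "europe", "paris": "europe", "madrid": "europe", "milan": "europe",
--     "amsterdam": "europe", "warsaw": "europe", "helsinki": "europe",
--     "moscow": "europe", "istanbul": "europe", "ankara": "europe", "munich": "europe",
--     "new york city": "north_america", "new york": "north_america", "nyc": "north_america",
--     "toronto": "north_america", "seattle": "north_america", "dallas": "north_america",
--     "atlanta": "north_america", "miami": "north_america", "chicago": "north_america",
--     "houston": "north_america", "austin": "north_america", "denver": "north_america",
--     "los angeles": "north_america", "san francisco": "north_america",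
--     "mexico city": "north_america", "panama city": "north_america",
-- }
--
--
-- def _city_region(city):
--     return _REGION_BY_CITY.get((city or "").lower(), "other")
-- ===== Notes on version B (the rewrite author's own statement) =====
-- stated objective: idiomatic
-- what changed: Replaced the loop over region->set groups with one flat city->region dictionary built once at module level, so the function is a single normalized-key lookup with default instead of iterating regions and testing set membership.
import Mathlib
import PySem

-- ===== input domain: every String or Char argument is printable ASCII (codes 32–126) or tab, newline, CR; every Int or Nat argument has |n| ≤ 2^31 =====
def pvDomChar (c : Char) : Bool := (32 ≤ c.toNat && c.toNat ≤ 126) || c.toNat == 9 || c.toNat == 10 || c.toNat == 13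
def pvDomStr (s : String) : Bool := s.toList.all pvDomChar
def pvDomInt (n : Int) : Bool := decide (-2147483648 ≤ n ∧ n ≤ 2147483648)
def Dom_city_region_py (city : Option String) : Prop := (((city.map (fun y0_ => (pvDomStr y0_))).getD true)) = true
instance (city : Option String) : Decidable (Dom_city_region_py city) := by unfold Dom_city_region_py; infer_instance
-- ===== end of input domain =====

-- B replaces A's loop over region→set groups by a single flat city→region dict lookup (idiomatic; same values).

-- ===== PORT A =====
-- region_map as a list of (region, set-of-cities) pairs in insertion order
def pvRegionMapA : List (String × PySem.Set String) :=
  [ ("east_asia", PySem.Set.ofList ["hong kong", "shenzhen", "guangzhou", "taipei", "shanghai",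
      "beijing", "wuhan", "chengdu", "chongqing", "seoul", "busan", "tokyo"]),
    ("southeast_asia", PySem.Set.ofList ["singapore", "kuala lumpur", "jakarta", "manila"]),
    ("europe", PySem.Set.ofList ["london", "paris", "madrid", "milan", "amsterdam", "warsaw",
      "helsinki", "moscow", "istanbul", "ankara", "munich"]),
    ("north_america", PySem.Set.ofList ["new york city", "new york", "nyc", "toronto", "seattle", "dallas",
      "atlanta", "miami", "chicago", "houston", "austin", "denver",
      "los angeles", "san francisco", "mexico city", "panama city"]) ]

-- the 'for region, cities in region_map.items(): if city in cities: return region' loop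
def pvLoopA (c : String) : List (String × PySem.Set String) → String
  | [] => "other"
  | (region, cities) :: rest => if PySem.Set.contains cities c then region else pvLoopA c rest

def city_region_py (city : Option String) : String :=
  pvLoopA (PySem.Str.lower (city.getD "")) pvRegionMapA

-- ===== PORT B =====
-- the module-level flat dict _REGION_BY_CITY
def pvRegionByCity : PySem.Dict String String :=
  PySem.Dict.ofList
    [ ("hong kong", "east_asia"), ("shenzhen", "east_asia"), ("guangzhou", "east_asia"),
      ("taipei", "east_asia"), ("shanghai", "east_asia"), ("beijing", "east_asia"),
      ("wuhan", "east_asia"), ("chengdu", "east_asia"), ("chongqing", "east_asia"),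
      ("seoul", "east_asia"), ("busan", "east_asia"), ("tokyo", "east_asia"),
      ("singapore", "southeast_asia"), ("kuala lumpur", "southeast_asia"),
      ("jakarta", "southeast_asia"), ("manila", "southeast_asia"),
      ("london", "europe"), ("paris", "europe"), ("madrid", "europe"), ("milan", "europe"),
      ("amsterdam", "europe"), ("warsaw", "europe"), ("helsinki", "europe"),
      ("moscow", "europe"), ("istanbul", "europe"), ("ankara", "europe"), ("munich", "europe"),
      ("new york city", "north_america"), ("new york", "north_america"), ("nyc", "north_america"),
      ("toronto", "north_america"), ("seattle", "north_america"), ("dallas", "north_america"),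
      ("atlanta", "north_america"), ("miami", "north_america"), ("chicago", "north_america"),
      ("houston", "north_america"), ("austin", "north_america"), ("denver", "north_america"),
      ("los angeles", "north_america"), ("san francisco", "north_america"),
      ("mexico city", "north_america"), ("panama city", "north_america") ]

def city_region_py_alt (city : Option String) : String :=
  PySem.Dict.getD pvRegionByCity (PySem.Str.lower (city.getD "")) "other"

-- ===== PRECONDITION & SPEC =====
def Spec_city_region_py (city : Option String) (out : String) : Prop := out = city_region_py_alt city
instance (city : Option String) (out : String) : Decidable (Spec_city_region_py city out) := by unfold Spec_city_region_py; infer_instance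

-- ===== CLAIM (what is proved, stated in full; the proofs are below) =====
def Claim_equal_city_region_py : Prop := ∀ (city : Option String), Dom_city_region_py city → Spec_city_region_py city (city_region_py city)

-- ===== LEMMAS AND PROOFS =====

-- one flat step: lookup in (cities mapped to region) ++ rest is membership in cities, then rest
theorem pv_getD_mk_map_append (c r d : String) (cs : List String) (rest : List (String × String)) :
    (PySem.Dict.mk (cs.map (fun x => (x, r)) ++ rest)).getD c d
      = if cs.contains c then r else (PySem.Dict.mk rest).getD c d := by
  induction cs with
  | nil => simp
  | cons h t ih =>
    by_cases hc : h = c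
    · subst hc
      simp [PySem.Dict.getD_eq_get?_getD, PySem.Dict.get?_mk_cons]
    · have : (h == c) = false := by simp [hc]
      simp only [List.map_cons, List.cons_append, PySem.Dict.getD_eq_get?_getD,
        PySem.Dict.get?_mk_cons, this, Bool.false_eq_true, if_false, List.contains_cons]
      rw [← PySem.Dict.getD_eq_get?_getD, ← PySem.Dict.getD_eq_get?_getD, ih]
      simp [Ne.symm hc]

-- A's grouped loop equals lookup in the flattened association list
theorem pv_loop_eq_flat (c : String) (groups : List (String × List String)) :
    pvLoopA c groups
      = (PySem.Dict.mk (groups.flatMap (fun g => g.2.map (fun x => (x, g.1))))).getD c "other" := by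
  induction groups with
  | nil => simp [pvLoopA, PySem.Dict.getD_eq_get?_getD]; rfl
  | cons g rest ih =>
    obtain ⟨r, cs⟩ := g
    simp only [pvLoopA, List.flatMap_cons, pv_getD_mk_map_append]
    rw [ih]
    simp [PySem.Set.contains]

-- the two literal tables flatten to the same association list (kernel computation)
set_option maxRecDepth 8192 in
theorem pv_tables_eq :
    pvRegionByCity
      = PySem.Dict.mk (pvRegionMapA.flatMap (fun g => g.2.map (fun x => (x, g.1)))) := by
  rfl

-- ===== VERDICT (by name: the statement is the Claim_ definition above) =====
theorem city_region_py_spec : Claim_equal_city_region_py := by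
  intro city _
  unfold Spec_city_region_py city_region_py city_region_py_alt
  rw [pv_tables_eq, pv_loop_eq_flat]
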